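-- pv_equiv track=rewrite | github.com/ZinoM21/beyond-shuffle | diversity.py | enforce_artist_diversity
-- ===== SOURCE A (Python) =====
-- def enforce_artist_diversity(tracks, max_per_artist=2):
--     artist_count = {}
--     diverse_tracks = []
--     for track, artist in tracks:
--         if artist_count.get(artist, 0) < max_per_artist:
--             diverse_tracks.append((track, artist))
--             artist_count[artist] = artist_count.get(artist, 0) + 1
--     return diverse_tracks
-- ===== SOURCE B (Python) =====
-- def enforce_artist_diversity(tracks, max_per_artist=2):
--     # Stateless filter: keep a track iff fewer than max_per_artist earlier
--     # tracks have the same artist (no running counter dict).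
--     return [
--         (track, artist)
--         for i, (track, artist) in enumerate(tracks)
--         if sum(1 for _, a in tracks[:i] if a == artist) < max_per_artist
--     ]
-- ===== Notes on version B (the rewrite author's own statement) =====
-- stated objective: alternative
-- what changed: Replaces the stateful single pass with a running artist-count dict by a stateless comprehension that keeps each track iff its artist occurs fewer than max_per_artist times among the earlier tracks (prefix count), trading the dict for an index-based filter.
import Mathlib
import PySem

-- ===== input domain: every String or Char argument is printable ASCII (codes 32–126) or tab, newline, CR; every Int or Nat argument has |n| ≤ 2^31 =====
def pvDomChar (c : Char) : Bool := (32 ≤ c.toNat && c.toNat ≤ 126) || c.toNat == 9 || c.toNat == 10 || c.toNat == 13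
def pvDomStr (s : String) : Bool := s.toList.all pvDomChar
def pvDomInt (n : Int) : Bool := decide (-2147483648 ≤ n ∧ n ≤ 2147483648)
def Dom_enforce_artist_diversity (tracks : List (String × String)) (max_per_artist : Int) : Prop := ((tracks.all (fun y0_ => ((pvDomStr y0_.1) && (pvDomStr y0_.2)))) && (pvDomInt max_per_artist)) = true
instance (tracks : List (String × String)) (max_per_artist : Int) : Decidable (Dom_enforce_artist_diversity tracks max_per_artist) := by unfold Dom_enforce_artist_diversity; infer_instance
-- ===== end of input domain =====

-- B replaces A's running artist-count dict by a stateless prefix-count filter (objective: alternative decomposition, same results).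

-- ===== PORT A =====
-- for track, artist in tracks: if artist_count.get(artist,0) < max: append; artist_count[artist] += 1
def enforce_artist_diversity (tracks : List (String × String)) (max_per_artist : Int) : List (String × String) :=
  (tracks.foldl
    (fun (st : PySem.Dict String Int × List (String × String)) p =>
      if st.1.getD p.2 0 < max_per_artist then
        (st.1.insert p.2 (st.1.getD p.2 0 + 1), st.2 ++ [(p.1, p.2)])
      else st)
    (PySem.Dict.empty, [])).2

-- ===== PORT B =====
-- comprehension over enumerate(tracks); tracks[:i] is PySem.List.slice tracks none (some i)
def enforce_artist_diversity_alt (tracks : List (String × String)) (max_per_artist : Int) : List (String × String) :=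
  (PySem.List.enumerate tracks).filterMap
    (fun ip =>
      if (((PySem.List.slice tracks none (some ip.1)).filter (fun q => q.2 == ip.2.2)).length : Int) < max_per_artist
      then some (ip.2.1, ip.2.2) else none)

-- ===== PRECONDITION & SPEC =====
def Spec_enforce_artist_diversity (tracks : List (String × String)) (max_per_artist : Int) (out : List (String × String)) : Prop := out = enforce_artist_diversity_alt tracks max_per_artist
instance (tracks : List (String × String)) (max_per_artist : Int) (out : List (String × String)) : Decidable (Spec_enforce_artist_diversity tracks max_per_artist out) := by unfold Spec_enforce_artist_diversity; infer_instance

-- ===== CLAIM (what is proved, stated in full; the proofs are below) =====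
def Claim_equal_enforce_artist_diversity : Prop := ∀ (tracks : List (String × String)) (max_per_artist : Int), Dom_enforce_artist_diversity tracks max_per_artist → Spec_enforce_artist_diversity tracks max_per_artist (enforce_artist_diversity tracks max_per_artist)

-- ===== LEMMAS AND PROOFS =====

-- number of occurrences of artist a in the list pre, as an Int
def pvCnt (pre : List (String × String)) (a : String) : Int :=
  ((pre.filter (fun q => q.2 == a)).length : Int)

-- common intermediate form: recursion over (processed prefix, remaining suffix)
def pvSpec (m : Int) (pre rest : List (String × String)) : List (String × String) :=
  match rest with
  | [] => []
  | p :: r => (if pvCnt pre p.2 < m then [(p.1, p.2)] else []) ++ pvSpec m (pre ++ [p]) r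

theorem pvCnt_nonneg (pre : List (String × String)) (a : String) : 0 ≤ pvCnt pre a := by
  simp [pvCnt]

theorem pvCnt_append_singleton (pre : List (String × String)) (p : Prod String String) (a : String) :
    pvCnt (pre ++ [p]) a = pvCnt pre a + (if p.2 = a then 1 else 0) := by
  simp [pvCnt, List.filter_append]
  split_ifs with h <;> simp [h]

-- A's loop, started from any dict satisfying the count invariant, computes pvSpec
theorem pvA_loop (m : Int) (rest : List (String × String)) :
    ∀ (pre : List (String × String)) (d : PySem.Dict String Int) (acc : List (String × String)),
    (∀ a, d.getD a 0 = min (pvCnt pre a) (max m 0)) →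
    (rest.foldl
      (fun (st : PySem.Dict String Int × List (String × String)) p =>
        if st.1.getD p.2 0 < m then
          (st.1.insert p.2 (st.1.getD p.2 0 + 1), st.2 ++ [(p.1, p.2)])
        else st)
      (d, acc)).2 = acc ++ pvSpec m pre rest := by
  induction rest with
  | nil => intro pre d acc _; simp [pvSpec]
  | cons p r ih =>
    intro pre d acc hd
    have hc := pvCnt_nonneg pre p.2
    have hcond : (d.getD p.2 0 < m) ↔ (pvCnt pre p.2 < m) := by
      rw [hd p.2]; omega
    by_cases h : pvCnt pre p.2 < m
    · have hd' : d.getD p.2 0 < m := hcond.mpr h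
      simp only [List.foldl_cons, if_pos hd']
      rw [ih (pre ++ [p]) _ _ ?_]
      · simp [pvSpec, if_pos h]
      · intro a
        rw [PySem.Dict.getD_insert, pvCnt_append_singleton]
        rcases eq_or_ne a p.2 with he | he
        · subst he
          rw [if_pos rfl, if_pos rfl, hd p.2]
          omega
        · rw [if_neg he, if_neg (fun hh => he hh.symm), hd a]
          omega
    · have hd' : ¬ (d.getD p.2 0 < m) := fun hh => h (hcond.mp hh)
      simp only [List.foldl_cons, if_neg hd']
      rw [ih (pre ++ [p]) d acc ?_]
      · simp [pvSpec, if_neg h]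
      · intro a
        rw [pvCnt_append_singleton, hd a]
        by_cases he : p.2 = a
        · subst he; rw [if_pos rfl]; omega
        · rw [if_neg he]; omega

-- B's comprehension over the suffix of tracks starting at index pre.length computes pvSpec
theorem pvB_loop (m : Int) (rest : List (String × String)) :
    ∀ (pre : List (String × String)),
    (PySem.List.enumerate rest (pre.length : Int)).filterMap
      (fun ip =>
        if (((PySem.List.slice (pre ++ rest) none (some ip.1)).filter (fun q => q.2 == ip.2.2)).length : Int) < m
        then some (ip.2.1, ip.2.2) else none)
    = pvSpec m pre rest := by
  induction rest with
  | nil => intro pre; simp [pvSpec, PySem.List.enumerate_nil]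
  | cons p r ih =>
    intro pre
    rw [PySem.List.enumerate_cons, List.filterMap_cons]
    have hslice : PySem.List.slice (pre ++ p :: r) none (some (pre.length : Int)) = pre := by
      rw [PySem.List.slice_to _ (by positivity)]
      simp
    have hmain : (PySem.List.enumerate r ((pre.length : Int) + 1)).filterMap
        (fun ip =>
          if (((PySem.List.slice (pre ++ p :: r) none (some ip.1)).filter (fun q => q.2 == ip.2.2)).length : Int) < m
          then some (ip.2.1, ip.2.2) else none) = pvSpec m (pre ++ [p]) r := by
      have h1 : ((pre.length : Int) + 1) = (((pre ++ [p]).length : Int)) := by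
        simp
      have h2 : pre ++ p :: r = (pre ++ [p]) ++ r := by simp
      rw [h1, h2]
      exact ih (pre ++ [p])
    simp only [hslice]
    by_cases h : pvCnt pre p.2 < m
    · rw [if_pos (by simpa [pvCnt] using h)]
      simp [pvSpec, if_pos h, hmain]
    · rw [if_neg (by simpa [pvCnt] using h)]
      simp [pvSpec, if_neg h, hmain]

-- ===== VERDICT (by name: the statement is the Claim_ definition above) =====
theorem enforce_artist_diversity_spec : Claim_equal_enforce_artist_diversity := by
  intro tracks m _
  unfold Spec_enforce_artist_diversity enforce_artist_diversity enforce_artist_diversity_alt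
  rw [pvA_loop m tracks [] PySem.Dict.empty []
      (by intro a
          rw [PySem.Dict.getD_empty]
          simp only [pvCnt, List.filter_nil, List.length_nil, Nat.cast_zero]
          omega)]
  have hB := pvB_loop m tracks []
  simp only [List.nil_append, List.length_nil, Nat.cast_zero] at hB
  rw [List.nil_append, ← hB]
  rfl
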